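-- pv_equiv track=rewrite | github.com/Sanjay-Mx21/explainable-financial-dashboard | app.py | align_event_date
-- ===== SOURCE A (Python) =====
-- def align_event_date(event_date, trading_dates):
--     trading_dates = sorted(trading_dates)
--     if not trading_dates:
--         return None
--     if event_date > trading_dates[-1]:
--         return trading_dates[-1]
--     for d in trading_dates:
--         if d >= event_date:
--             return d
--     return None
-- ===== SOURCE B (Python) =====
-- def align_event_date(event_date, trading_dates):
--     best = None
--     mx = None
--     for d in trading_dates:
--         if mx is None or d > mx:
--             mx = d
--         if d >= event_date and (best is None or d < best):
--             best = d
--     if mx is None: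
--         return None
--     if event_date > mx:
--         return mx
--     return best
-- ===== Notes on version B (the rewrite author's own statement) =====
-- stated objective: alternative
-- what changed: Replaces sort-then-scan with a single unsorted pass that tracks the overall maximum and the minimum date >= event_date.
import Mathlib
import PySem

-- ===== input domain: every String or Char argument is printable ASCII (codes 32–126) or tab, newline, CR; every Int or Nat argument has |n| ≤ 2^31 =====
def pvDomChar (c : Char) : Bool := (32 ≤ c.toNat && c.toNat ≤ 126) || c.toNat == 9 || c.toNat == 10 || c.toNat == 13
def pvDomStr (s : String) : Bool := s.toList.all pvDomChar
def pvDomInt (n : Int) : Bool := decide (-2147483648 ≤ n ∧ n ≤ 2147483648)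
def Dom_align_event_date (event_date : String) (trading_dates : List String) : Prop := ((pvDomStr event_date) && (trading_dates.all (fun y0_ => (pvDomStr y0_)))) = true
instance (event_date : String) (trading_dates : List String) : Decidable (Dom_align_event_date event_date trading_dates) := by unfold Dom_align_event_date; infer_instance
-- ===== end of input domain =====

-- B replaces A's sort-then-scan with a single unsorted pass tracking the running maximum
-- and the minimum element ≥ event_date (objective: alternative algorithm, no sort).

-- ===== PORT A =====
-- 'for d in trading_dates: if d >= event_date: return d' (on the sorted list)
def alignFind (event_date : String) : List String → Option String
  | [] => none
  | d :: t => if event_date ≤ d then some d else alignFind event_date t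

def align_event_date (event_date : String) (trading_dates : List String) : Option String :=
  let td := PySem.List.sorted trading_dates (fun x => x) false
  if td = [] then none
  else
    match PySem.List.pyGet? td (-1) with
    | none => none   -- unreachable: td nonempty
    | some last => if last < event_date then some last else alignFind event_date td

-- ===== PORT B =====
def align_event_date_alt (event_date : String) (trading_dates : List String) : Option String :=
  let st := trading_dates.foldl (fun (acc : Option String × Option String) d =>
      let best := if event_date ≤ d then
          (match acc.1 with
           | none => some d
           | some b => if d < b then some d else some b)
        else acc.1
      let mx := match acc.2 with
        | none => some d
        | some m => if m < d then some d else some m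
      (best, mx)) (none, none)
  match st.2 with
  | none => none
  | some m => if m < event_date then some m else st.1

-- ===== PRECONDITION & SPEC =====
def Spec_align_event_date (event_date : String) (trading_dates : List String) (out : Option String) : Prop := out = align_event_date_alt event_date trading_dates
instance (event_date : String) (trading_dates : List String) (out : Option String) : Decidable (Spec_align_event_date event_date trading_dates out) := by unfold Spec_align_event_date; infer_instance

-- ===== CLAIM (what is proved, stated in full; the proofs are below) =====
def Claim_equal_align_event_date : Prop := ∀ (event_date : String) (trading_dates : List String), Dom_align_event_date event_date trading_dates → Spec_align_event_date event_date trading_dates (align_event_date event_date trading_dates)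

-- ===== LEMMAS AND PROOFS =====

-- B's fold over the pair of accumulators splits into two independent folds
theorem pvBFold (ed : String) (ts : List String) : ∀ (a b : Option String),
    ts.foldl (fun (acc : Option String × Option String) d =>
      (if ed ≤ d then (match acc.1 with | none => some d | some b => if d < b then some d else some b) else acc.1,
       match acc.2 with | none => some d | some m => if m < d then some d else some m)) (a, b)
  = (ts.foldl (fun b d => if ed ≤ d then (match b with | none => some d | some b => if d < b then some d else some b) else b) a,
     ts.foldl (fun m d => match m with | none => some d | some m => if m < d then some d else some m) b) := by
  induction ts with
  | nil => intro a b; rfl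
  | cons x t ih =>
    intro a b
    rw [List.foldl_cons, List.foldl_cons, List.foldl_cons]
    exact ih _ _

theorem pvIfMax (x d : String) : (if x < d then d else x) = max x d := by
  by_cases h : x < d
  · simp [h, max_eq_right h.le]
  · simp [h, max_eq_left (not_lt.mp h)]

theorem pvIfMin (x d : String) : (if d < x then d else x) = min x d := by
  by_cases h : d < x
  · simp [h, min_eq_right h.le]
  · simp [h, min_eq_left (not_lt.mp h)]

-- the optional-max accumulator is a plain foldl max once started
theorem pvGmaxFold (t : List String) (x : String) :
    t.foldl (fun m d => match m with | none => some d | some m => if m < d then some d else some m) (some x)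
      = some (t.foldl max x) := by
  induction t generalizing x with
  | nil => rfl
  | cons y t ih =>
    rw [List.foldl_cons, List.foldl_cons]
    show List.foldl _ (if x < y then some y else some x) t = some (List.foldl max (max x y) t)
    rw [← apply_ite some, pvIfMax]
    exact ih (max x y)

theorem pvGminFold (t : List String) (x : String) :
    t.foldl (fun m d => match m with | none => some d | some b => if d < b then some d else some b) (some x)
      = some (t.foldl min x) := by
  induction t generalizing x with
  | nil => rfl
  | cons y t ih =>
    rw [List.foldl_cons, List.foldl_cons]
    show List.foldl _ (if y < x then some y else some x) t = some (List.foldl min (min x y) t)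
    rw [← apply_ite some, pvIfMin]
    exact ih (min x y)

theorem pvFoldlMinSelf (l : List String) (x : String) (h : ∀ y ∈ l, x ≤ y) :
    l.foldl min x = x := by
  induction l with
  | nil => rfl
  | cons y t ih =>
    have hx : x ≤ y := h y (by simp)
    simp only [List.foldl_cons, min_eq_left hx]
    exact ih (fun z hz => h z (by simp [hz]))

-- min?/max? with the identity key depend only on the multiset of elements
theorem pvMinPerm (l l' : List String) (hp : l.Perm l') :
    PySem.List.min? l (fun x => x) = PySem.List.min? l' (fun x => x) := by
  rcases l with _ | ⟨x, t⟩
  · have h0 : l' = [] := hp.symm.eq_nil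
    simp [h0, PySem.List.min?]
  · rcases hl : PySem.List.min? (x :: t) (fun y => y) with _ | m
    · exact absurd ((PySem.List.min?_eq_none_iff _ _).1 hl) (by simp)
    · rcases hl' : PySem.List.min? l' (fun y => y) with _ | m'
      · have h' := (PySem.List.min?_eq_none_iff _ _).1 hl'
        have := List.perm_nil.mp (h' ▸ hp)
        simp at this
      · have hm : m ∈ x :: t := PySem.List.min?_mem hl
        have hm' : m' ∈ l' := PySem.List.min?_mem hl'
        have h1 : m ≤ m' := by simpa using PySem.List.min?_isMin hl m' (hp.mem_iff.mpr hm')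
        have h2 : m' ≤ m := by simpa using PySem.List.min?_isMin hl' m (hp.mem_iff.mp hm)
        exact congrArg some (le_antisymm h1 h2)

theorem pvGmaxNone (x : String) (t : List String) :
    (x :: t).foldl (fun m d => match m with | none => some d | some m => if m < d then some d else some m) none
      = some (t.foldl max x) := by
  rw [List.foldl_cons]
  show List.foldl _ (some x) t = _
  exact pvGmaxFold t x

theorem pvGminNone (l : List String) :
    l.foldl (fun m d => match m with | none => some d | some b => if d < b then some d else some b) none
      = PySem.List.min? l (fun x => x) := by
  cases l with
  | nil => simp [PySem.List.min?]
  | cons z r =>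
    rw [List.foldl_cons]
    show List.foldl _ (some z) r = _
    rw [pvGminFold, PySem.List.min?_id_cons]

-- the last element of a ≤-sorted list bounds every element
theorem pvLeGetLast : ∀ (l : List String) (_ : l.Pairwise (· ≤ ·)) (h : l ≠ []) (y : String), y ∈ l → y ≤ l.getLast h
  | [x], _, _, y, hy => by simp at hy; simp [hy, List.getLast]
  | x :: z :: t, hp, _, y, hy => by
    have hpt : (z :: t).Pairwise (· ≤ ·) := hp.tail
    rw [List.getLast_cons (by simp)]
    rcases List.mem_cons.1 hy with rfl | hy'
    · have hmem := List.getLast_mem (l := z :: t) (by simp)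
      exact (List.pairwise_cons.1 hp).1 _ hmem
    · exact pvLeGetLast (z :: t) hpt (by simp) y hy'

-- A's linear scan over a sorted list returns exactly the minimum of the qualifying elements
theorem pvAlignFindSorted (ed : String) : ∀ (l : List String), l.Pairwise (· ≤ ·) →
    alignFind ed l = PySem.List.min? (l.filter (fun d => decide (ed ≤ d))) (fun x => x)
  | [], _ => by simp [alignFind, PySem.List.min?]
  | d :: t, hp => by
    by_cases h : ed ≤ d
    · have hfilter : (d :: t).filter (fun d => decide (ed ≤ d))
          = d :: t.filter (fun d => decide (ed ≤ d)) := by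
        rw [List.filter_cons, decide_eq_true h]; simp
      rw [alignFind, if_pos h, hfilter, PySem.List.min?_id_cons]
      have : (t.filter (fun d => decide (ed ≤ d))).foldl min d = d := by
        apply pvFoldlMinSelf
        intro y hy
        exact (List.pairwise_cons.1 hp).1 y (List.mem_of_mem_filter hy)
      rw [this]
    · have hfilter : (d :: t).filter (fun d => decide (ed ≤ d))
          = t.filter (fun d => decide (ed ≤ d)) := by
        rw [List.filter_cons, decide_eq_false h]; simp
      rw [alignFind, if_neg h, hfilter]
      exact pvAlignFindSorted ed t hp.tail

theorem align_event_date_main (ed : String) (ts : List String) :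
    align_event_date ed ts = align_event_date_alt ed ts := by
  simp only [align_event_date, align_event_date_alt]
  rw [pvBFold]
  cases ts with
  | nil => simp [PySem.List.sorted]
  | cons x t =>
    -- B side: the max accumulator is the running maximum
    rw [pvGmaxNone]
    have hsne : PySem.List.sorted (x :: t) (fun x => x) false ≠ [] := by
      rw [Ne, PySem.List.sorted_eq_nil_iff]; simp
    rw [if_neg hsne, PySem.List.pyGet?_neg_one, List.getLast?_eq_some_getLast hsne]
    -- the sorted list's last element is the running maximum
    have hperm : (PySem.List.sorted (x :: t) (fun x => x) false).Perm (x :: t) :=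
      PySem.List.sorted_perm _ _ _
    have hpair : (PySem.List.sorted (x :: t) (fun x => x) false).Pairwise (· ≤ ·) := by
      simpa using PySem.List.sorted_pairwise (xs := x :: t) (key := fun x => x)
    have hmax : PySem.List.max? (x :: t) (fun y => y) = some (t.foldl max x) :=
      PySem.List.max?_id_cons x t
    have hub : ∀ y ∈ x :: t, y ≤ t.foldl max x := by
      intro y hy; simpa using PySem.List.max?_isMax hmax y hy
    have hlastM : (PySem.List.sorted (x :: t) (fun x => x) false).getLast hsne = t.foldl max x := by
      refine le_antisymm ?_ ?_
      · exact hub _ (hperm.mem_iff.mp (List.getLast_mem hsne))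
      · exact pvLeGetLast _ hpair hsne _ (hperm.mem_iff.mpr (PySem.List.max?_mem hmax))
    rw [hlastM]
    by_cases hcmp : t.foldl max x < ed
    · simp [hcmp]
    · simp only [hcmp, if_false]
      -- both sides: the minimum of the qualifying elements
      rw [pvAlignFindSorted ed _ hpair]
      rw [PySem.List.foldl_ite_eq_foldl_filter (p := fun d => ed ≤ d)]
      rw [pvGminNone]
      exact pvMinPerm _ _ (hperm.filter _)

-- ===== VERDICT (by name: the statement is the Claim_ definition above) =====
theorem align_event_date_spec : Claim_equal_align_event_date := by
  intro ed ts _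
  exact align_event_date_main ed ts
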